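-- pv_equiv track=rewrite | github.com/bozzfozz/soulspot | src/soulspot/domain/value_objects/artist_normalization.py | extract_sort_name
-- ===== SOURCE A (Python) =====
-- def extract_sort_name(name: str) -> str:
--     """Extract sort name from artist name (move articles to end).
--
--     Hey future me - this is for creating sort-friendly names!
--     "The Beatles" -> "Beatles, The"
--     "A Tribe Called Quest" -> "Tribe Called Quest, A"
--
--     Useful for:
--     - Library sorting
--     - Alphabetical artist lists
--     - Music player displays
--
--     Args:
--         name: Original artist name
--
--     Returns:
--         Sort-friendly name with articles moved to end
--
--     Examples:
--         >>> extract_sort_name("The Beatles")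
--         'Beatles, The'
--         >>> extract_sort_name("A Tribe Called Quest")
--         'Tribe Called Quest, A'
--         >>> extract_sort_name("Pink Floyd")
--         'Pink Floyd'
--     """
--     if not name:
--         return ""
--
--     # Articles to move to end
--     articles = ("the ", "a ", "an ")
--
--     name_lower = name.lower()
--     for article in articles:
--         if name_lower.startswith(article):
--             # Move article to end with comma
--             rest = name[len(article) :]
--             article_proper = name[: len(article) - 1]  # Remove trailing space
--             return f"{rest}, {article_proper}"
--
--     return name
-- ===== SOURCE B (Python) =====
-- def extract_sort_name(name: str) -> str:
--     parts = name.split(' ', 1)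
--     if len(parts) == 2 and parts[0].lower() in ('the', 'a', 'an'):
--         return f"{parts[1]}, {parts[0]}"
--     return name
-- ===== Notes on version B (the rewrite author's own statement) =====
-- stated objective: idiomatic
-- what changed: Instead of looping over article prefixes with lowercase-startswith and slice arithmetic, B splits the name once at the first space and tests the whole first word against the article set, which also makes the empty-string guard unnecessary.
import Mathlib
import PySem

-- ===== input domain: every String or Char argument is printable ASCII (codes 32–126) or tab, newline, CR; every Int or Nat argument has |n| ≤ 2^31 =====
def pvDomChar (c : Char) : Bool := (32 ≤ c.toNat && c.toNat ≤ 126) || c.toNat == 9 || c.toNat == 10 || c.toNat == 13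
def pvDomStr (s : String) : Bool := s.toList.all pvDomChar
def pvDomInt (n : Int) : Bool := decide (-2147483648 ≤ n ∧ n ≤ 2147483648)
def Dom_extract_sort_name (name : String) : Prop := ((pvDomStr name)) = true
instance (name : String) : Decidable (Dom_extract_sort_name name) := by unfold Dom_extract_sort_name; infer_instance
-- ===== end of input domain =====

-- B splits the name once at the first space and tests the whole first word against the
-- article set, instead of A's loop over lowercase article prefixes with startswith and
-- slice arithmetic (objective: idiomatic). Equivalence is proved on all inputs.

-- ===== PORT A =====
def extract_sort_name (name : String) : String :=
  if name = "" then ""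
  else
    let name_lower := PySem.Chars.lower name.toList
    if PySem.Chars.startswith name_lower "the ".toList then
      String.ofList (PySem.List.slice name.toList (some 4) none ++ ", ".toList ++
                     PySem.List.slice name.toList none (some 3))
    else if PySem.Chars.startswith name_lower "a ".toList then
      String.ofList (PySem.List.slice name.toList (some 2) none ++ ", ".toList ++
                     PySem.List.slice name.toList none (some 1))
    else if PySem.Chars.startswith name_lower "an ".toList then
      String.ofList (PySem.List.slice name.toList (some 3) none ++ ", ".toList ++
                     PySem.List.slice name.toList none (some 2))
    else name

-- ===== PORT B =====
def extract_sort_name_alt (name : String) : String :=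
  match PySem.Chars.splitMax? name.toList " ".toList 1 with
  | some [w, rest] =>
      if PySem.Chars.lower w = "the".toList ∨ PySem.Chars.lower w = "a".toList ∨
         PySem.Chars.lower w = "an".toList then
        String.ofList (rest ++ ", ".toList ++ w)
      else name
  | _ => name

-- ===== PRECONDITION & SPEC =====
def Spec_extract_sort_name (name : String) (out : String) : Prop := out = extract_sort_name_alt name
instance (name : String) (out : String) : Decidable (Spec_extract_sort_name name out) := by unfold Spec_extract_sort_name; infer_instance

-- ===== CLAIM (what is proved, stated in full; the proofs are below) =====
def Claim_equal_extract_sort_name : Prop := ∀ (name : String), Dom_extract_sort_name name → Spec_extract_sort_name name (extract_sort_name name)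

-- ===== LEMMAS AND PROOFS =====

theorem lowerChar_eq_space_iff (c : Char) : PySem.Chars.lowerChar c = ' ' ↔ c = ' ' := by
  by_cases hc : PySem.Chars.isupper c = true
  · simp only [PySem.Chars.lowerChar, hc, if_pos]
    simp only [PySem.Chars.isupper, Bool.and_eq_true, decide_eq_true_eq] at hc
    have h65 : 65 ≤ c.toNat := Nat.succ_le_of_lt hc.1
    have h90 : c.toNat ≤ 90 := Nat.le_of_lt_succ (Nat.lt_succ_of_le hc.2)
    have h32 : (' ' : Char).toNat = 32 := rfl
    constructor
    · intro h
      exfalso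
      have h2 := congrArg Char.toNat h
      rw [Char.toNat_ofNat, if_pos (Or.inl (by omega) : (c.toNat + 32).isValidChar)] at h2
      omega
    · intro h
      exfalso
      rw [h] at h65
      omega
  · simp [PySem.Chars.lowerChar, hc]

theorem prefix_lower_iff (w : List Char) (hw : ' ' ∉ w) (l : List Char) :
    (w ++ [' ']) <+: l.map PySem.Chars.lowerChar ↔
      (' ' ∈ l ∧ (l.takeWhile (· ≠ ' ')).map PySem.Chars.lowerChar = w) := by
  induction w generalizing l with
  | nil =>
    cases l with
    | nil => simp
    | cons c r =>
      simp only [List.nil_append, List.map_cons, List.cons_prefix_cons, List.nil_prefix,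
                 and_true, List.mem_cons]
      constructor
      · intro h
        have hc : c = ' ' := (lowerChar_eq_space_iff c).mp h.symm
        subst hc
        refine ⟨Or.inl rfl, ?_⟩
        rw [List.takeWhile_cons_of_neg (by simp)]
        rfl
      · rintro ⟨_, htk⟩
        by_cases hc : c = ' '
        · subst hc; exact (by decide : (' ' : Char) = PySem.Chars.lowerChar ' ')
        · exfalso
          rw [List.takeWhile_cons_of_pos (by simp [hc])] at htk
          simp at htk
  | cons a w' ih =>
    have ha : a ≠ ' ' := fun h => hw (h ▸ List.mem_cons_self)
    have hw' : ' ' ∉ w' := fun h => hw (List.mem_cons_of_mem _ h)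
    cases l with
    | nil => simp
    | cons c r =>
      simp only [List.cons_append, List.map_cons, List.cons_prefix_cons, List.mem_cons]
      by_cases hc : c = ' '
      · subst hc
        constructor
        · rintro ⟨h1, _⟩
          exact absurd (h1.trans (by decide : PySem.Chars.lowerChar ' ' = ' ')) ha
        · rintro ⟨_, htk⟩
          exfalso
          rw [List.takeWhile_cons_of_neg (by simp)] at htk
          simp at htk
      · rw [List.takeWhile_cons_of_pos (by simp [hc])]
        simp only [List.map_cons]
        constructor
        · rintro ⟨h1, h2⟩
          rcases (ih hw' r).mp h2 with ⟨hm2, htk2⟩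
          exact ⟨Or.inr hm2, by rw [htk2, h1]⟩
        · rintro ⟨hm2, htk2⟩
          injection htk2 with hA hB
          cases hm2 with
          | inl h => exact absurd h.symm hc
          | inr h => exact ⟨hA.symm, (ih hw' r).mpr ⟨h, hB⟩⟩

theorem go_zero (fuel : Nat) (l cur : List Char) (acc : List (List Char)) :
    PySem.Chars.splitOnMax.go [' '] fuel 0 l cur acc = ((cur.reverse ++ l) :: acc).reverse := by
  cases fuel with
  | zero => rfl
  | succ f =>
    cases l with
    | nil => simp [PySem.Chars.splitOnMax.go]
    | cons c r => simp [PySem.Chars.splitOnMax.go]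

theorem go_one (l : List Char) : ∀ (fuel : Nat) (cur : List Char) (acc : List (List Char)), l.length < fuel →
    PySem.Chars.splitOnMax.go [' '] fuel 1 l cur acc =
      if ' ' ∈ l then
        acc.reverse ++ [cur.reverse ++ l.takeWhile (· ≠ ' '), (l.dropWhile (· ≠ ' ')).tail]
      else acc.reverse ++ [cur.reverse ++ l] := by
  induction l with
  | nil =>
    intro fuel cur acc hf
    cases fuel with
    | zero => omega
    | succ f => simp [PySem.Chars.splitOnMax.go]
  | cons c r ih =>
    intro fuel cur acc hf
    cases fuel with
    | zero => omega
    | succ f =>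
      by_cases hc : c = ' '
      · subst hc
        simp only [PySem.Chars.splitOnMax.go, List.isPrefixOf, beq_self_eq_true,
                   Bool.true_and, if_true]
        rw [show (1 : Nat) - 1 = 0 from rfl]
        rw [go_zero]
        simp [List.takeWhile_cons, List.dropWhile_cons]
      · have hr : r.length < f := by simpa using Nat.lt_of_succ_lt_succ hf
        simp only [PySem.Chars.splitOnMax.go]
        rw [if_neg (show ¬ (List.isPrefixOf [' '] (c :: r) = true) from by
          simp only [List.isPrefixOf, List.isPrefixOf_nil_left, Bool.and_true, beq_iff_eq]
          exact fun h => hc h.symm)]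
        rw [ih f (c :: cur) acc hr]
        by_cases hm : ' ' ∈ r
        · simp [hm, hc, List.takeWhile_cons, List.dropWhile_cons, Ne.symm hc]
        · simp [hm, hc, List.takeWhile_cons, Ne.symm hc]

theorem splitOnMax_space_one (l : List Char) :
    PySem.Chars.splitOnMax l [' '] 1 =
      if ' ' ∈ l then [l.takeWhile (· ≠ ' '), (l.dropWhile (· ≠ ' ')).tail]
      else [l] := by
  unfold PySem.Chars.splitOnMax
  rw [if_neg (by norm_num)]
  rw [show ((1:Int).toNat) = 1 from rfl]
  rw [go_one l (l.length + 1) [] [] (Nat.lt_succ_self _)]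
  split <;> simp

theorem decomp_at_space (l : List Char) (h : ' ' ∈ l) :
    l = l.takeWhile (· ≠ ' ') ++ ' ' :: (l.dropWhile (· ≠ ' ')).tail := by
  have hd : l.dropWhile (· ≠ ' ') ≠ [] := by
    intro he
    have := List.takeWhile_append_dropWhile (p := fun c => decide (c ≠ ' ')) (l := l)
    rw [he, List.append_nil] at this
    rw [← this] at h
    have := List.mem_takeWhile_imp h
    simp at this
  have hh : (l.dropWhile (· ≠ ' ')).head hd = ' ' := by
    have := List.head_dropWhile_not (p := fun c => decide (c ≠ ' ')) hd
    simpa using this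
  calc l = l.takeWhile (fun c => decide (c ≠ ' ')) ++ l.dropWhile (fun c => decide (c ≠ ' ')) :=
        (List.takeWhile_append_dropWhile).symm
    _ = l.takeWhile (fun c => decide (c ≠ ' ')) ++
          ((l.dropWhile (fun c => decide (c ≠ ' '))).head hd :: (l.dropWhile (fun c => decide (c ≠ ' '))).tail) := by
        rw [List.cons_head_tail]
    _ = l.takeWhile (fun c => decide (c ≠ ' ')) ++ ' ' :: (l.dropWhile (fun c => decide (c ≠ ' '))).tail := by
        rw [hh]

theorem take_drop_of_decomp (t s : List Char) (hsp : ' ' ∉ t) :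
    (t ++ ' ' :: s).takeWhile (· ≠ ' ') = t ∧
    (t ++ ' ' :: s).take t.length = t ∧ (t ++ ' ' :: s).drop (t.length + 1) = s := by
  refine ⟨?_, by simp, by simp⟩
  have hself : List.takeWhile (fun c => decide (c ≠ ' ')) t = t := by
    rw [List.takeWhile_eq_self_iff]
    intro x hx
    simp only [ne_eq, decide_eq_true_eq]
    intro hxe; exact hsp (hxe ▸ hx)
  rw [List.takeWhile_append, if_pos (by rw [hself])]
  simp [List.takeWhile_cons]

theorem ports_agree (name : String) : extract_sort_name name = extract_sort_name_alt name := by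
  unfold extract_sort_name extract_sort_name_alt
  have hsep : " ".toList = [' '] := rfl
  rw [hsep]
  rw [show PySem.Chars.splitMax? name.toList [' '] 1
        = some (PySem.Chars.splitOnMax name.toList [' '] 1) from rfl]
  rw [splitOnMax_space_one name.toList]
  by_cases hm : ' ' ∈ name.toList
  · rw [if_pos hm]
    have hne : ¬ name = "" := by
      intro he; subst he; simp at hm
    rw [if_neg hne]
    set t := name.toList.takeWhile (· ≠ ' ') with ht
    set s := (name.toList.dropWhile (· ≠ ' ')).tail with hs
    have hdec : name.toList = t ++ ' ' :: s := decomp_at_space _ hm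
    have hsp : ' ' ∉ t := by
      intro hx
      have := List.mem_takeWhile_imp hx
      simp at this
    have hthe : PySem.Chars.startswith (PySem.Chars.lower name.toList) "the ".toList = true ↔
        t.map PySem.Chars.lowerChar = "the".toList := by
      rw [show "the ".toList = "the".toList ++ [' '] from rfl, PySem.Chars.startswith_iff]
      unfold PySem.Chars.lower
      rw [prefix_lower_iff _ (by decide) _, ← ht]
      simp [hm]
    have ha : PySem.Chars.startswith (PySem.Chars.lower name.toList) "a ".toList = true ↔
        t.map PySem.Chars.lowerChar = "a".toList := by
      rw [show "a ".toList = "a".toList ++ [' '] from rfl, PySem.Chars.startswith_iff]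
      unfold PySem.Chars.lower
      rw [prefix_lower_iff _ (by decide) _, ← ht]
      simp [hm]
    have han : PySem.Chars.startswith (PySem.Chars.lower name.toList) "an ".toList = true ↔
        t.map PySem.Chars.lowerChar = "an".toList := by
      rw [show "an ".toList = "an".toList ++ [' '] from rfl, PySem.Chars.startswith_iff]
      unfold PySem.Chars.lower
      rw [prefix_lower_iff _ (by decide) _, ← ht]
      simp [hm]
    have htd := take_drop_of_decomp t s hsp
    show _ = (if PySem.Chars.lower t = "the".toList ∨ PySem.Chars.lower t = "a".toList ∨
         PySem.Chars.lower t = "an".toList then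
        String.ofList (s ++ ", ".toList ++ t) else name)
    have hlow : PySem.Chars.lower t = t.map PySem.Chars.lowerChar := rfl
    by_cases h1 : t.map PySem.Chars.lowerChar = "the".toList
    · rw [if_pos (hthe.mpr h1), if_pos (by rw [hlow]; left; exact h1)]
      have hlen : t.length = 3 := by
        have := congrArg List.length h1; simpa using this
      rw [PySem.List.slice_from name.toList (a := 4) (by norm_num),
          PySem.List.slice_to name.toList (b := 3) (by norm_num)]
      rw [show ((4:Int).toNat) = 4 from rfl, show ((3:Int).toNat) = 3 from rfl]
      have htake : List.take 3 (t ++ ' ' :: s) = t := by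
        have h' := htd.2.1; rw [hlen] at h'; exact h'
      have hdrop : List.drop 4 (t ++ ' ' :: s) = s := by
        have h' := htd.2.2; rw [hlen] at h'; norm_num at h'; exact h'
      rw [hdec, hdrop, htake]
    · rw [if_neg (by rw [hthe]; exact h1)]
      by_cases h2 : t.map PySem.Chars.lowerChar = "a".toList
      · rw [if_pos (ha.mpr h2), if_pos (by rw [hlow]; right; left; exact h2)]
        have hlen : t.length = 1 := by
          have := congrArg List.length h2; simpa using this
        rw [PySem.List.slice_from name.toList (a := 2) (by norm_num),
            PySem.List.slice_to name.toList (b := 1) (by norm_num)]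
        rw [show ((2:Int).toNat) = 2 from rfl, show ((1:Int).toNat) = 1 from rfl]
        have htake : List.take 1 (t ++ ' ' :: s) = t := by
          have h' := htd.2.1; rw [hlen] at h'; exact h'
        have hdrop : List.drop 2 (t ++ ' ' :: s) = s := by
          have h' := htd.2.2; rw [hlen] at h'; norm_num at h'; exact h'
        rw [hdec, hdrop, htake]
      · rw [if_neg (by rw [ha]; exact h2)]
        by_cases h3 : t.map PySem.Chars.lowerChar = "an".toList
        · rw [if_pos (han.mpr h3), if_pos (by rw [hlow]; right; right; exact h3)]
          have hlen : t.length = 2 := by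
            have := congrArg List.length h3; simpa using this
          rw [PySem.List.slice_from name.toList (a := 3) (by norm_num),
              PySem.List.slice_to name.toList (b := 2) (by norm_num)]
          rw [show ((3:Int).toNat) = 3 from rfl, show ((2:Int).toNat) = 2 from rfl]
          have htake : List.take 2 (t ++ ' ' :: s) = t := by
            have h' := htd.2.1; rw [hlen] at h'; exact h'
          have hdrop : List.drop 3 (t ++ ' ' :: s) = s := by
            have h' := htd.2.2; rw [hlen] at h'; norm_num at h'; exact h'
          rw [hdec, hdrop, htake]
        · rw [if_neg (by rw [han]; exact h3)]
          rw [if_neg (by rw [hlow]; exact fun h => h.elim h1 (fun h' => h'.elim h2 h3))]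
  · rw [if_neg hm]
    have hfalse : ∀ w : List Char, ' ' ∉ w →
        PySem.Chars.startswith (PySem.Chars.lower name.toList) (w ++ [' ']) = false := by
      intro w hw
      rw [← Bool.not_eq_true, PySem.Chars.startswith_iff]
      unfold PySem.Chars.lower
      rw [prefix_lower_iff _ hw _]
      simp [hm]
    rw [show "the ".toList = "the".toList ++ [' '] from rfl,
        show "a ".toList = "a".toList ++ [' '] from rfl,
        show "an ".toList = "an".toList ++ [' '] from rfl]
    have hthe2 := hfalse "the".toList (by decide)
    have ha2 := hfalse "a".toList (by decide)
    have han2 := hfalse "an".toList (by decide)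
    simp only [hthe2, ha2, han2, Bool.false_eq_true, if_false]
    show (if name = "" then "" else name) = name
    split
    · next h => exact h.symm
    · rfl

-- ===== VERDICT (by name: the statement is the Claim_ definition above) =====
theorem extract_sort_name_spec : Claim_equal_extract_sort_name := by
  intro name _
  exact ports_agree name
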